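-- pv_equiv track=rewrite | github.com/jessicaxiao11/Break-Down-Tech | playGameJustifyText.py | spacedLine
-- ===== SOURCE A (Python) =====
-- def spacedLine (widthString, x, y):
--     currentSpaceCount = 0
--     spacedString = ""
--     for c in range(len(widthString)):
--         if widthString[c] == " ":
--             currentSpaceCount += 1
--             if currentSpaceCount <= y:
--                 spacedString += x* " " + 2* " "
--             else:
--                 spacedString += x* " " + " "
--         else:
--             spacedString += widthString[c]
--     return spacedString
-- ===== SOURCE B (Python) =====
-- def spacedLine(widthString, x, y):
--     segments = widthString.split(" ")
--     parts = [segments[0]]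
--     for i, seg in enumerate(segments[1:], 1):
--         gap = " " * x + ("  " if i <= y else " ")
--         parts.append(gap + seg)
--     return "".join(parts)
-- ===== Notes on version B (the rewrite author's own statement) =====
-- stated objective: faster
-- what changed: B replaces A's per-character scan with a running space counter (appending to a string at every character) by splitting the string on " " into segments and rejoining them once with precomputed gap strings indexed by 1-based gap number.
import Mathlib
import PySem

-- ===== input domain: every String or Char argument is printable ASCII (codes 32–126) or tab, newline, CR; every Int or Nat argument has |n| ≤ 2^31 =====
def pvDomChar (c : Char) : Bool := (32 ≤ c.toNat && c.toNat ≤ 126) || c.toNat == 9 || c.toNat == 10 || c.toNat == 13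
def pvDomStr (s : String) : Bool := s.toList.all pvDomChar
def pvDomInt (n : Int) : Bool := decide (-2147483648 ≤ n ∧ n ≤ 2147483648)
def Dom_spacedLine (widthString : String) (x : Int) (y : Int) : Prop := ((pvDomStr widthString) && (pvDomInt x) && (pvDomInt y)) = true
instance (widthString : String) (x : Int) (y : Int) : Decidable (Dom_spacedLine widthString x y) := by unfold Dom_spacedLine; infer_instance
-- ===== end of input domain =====

-- B splits on " " and rejoins segments with precomputed per-gap strings instead of A's
-- per-character scan with a running space counter (objective: faster, measured).

-- ===== PORT A =====
-- for c in range(len(widthString)): index widthString[c] (always in range, so pyGetD's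
-- default is never used); state = (currentSpaceCount, spacedString)
def spacedLine (widthString : String) (x : Int) (y : Int) : String :=
  let cs := widthString.toList
  String.mk ((PySem.List.pyRange 0 (PySem.Chars.len cs) 1).foldl
    (fun (st : Int × List Char) c =>
      let ch := PySem.List.pyGetD cs c ' '
      if ch = ' ' then
        (st.1 + 1,
          if st.1 + 1 ≤ y then st.2 ++ (PySem.List.pyRepeat [' '] x ++ [' ', ' '])
          else st.2 ++ (PySem.List.pyRepeat [' '] x ++ [' ']))
      else (st.1, st.2 ++ [ch]))
    (0, [])).2

-- ===== PORT B =====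
-- segments = widthString.split(" "); parts = [segments[0]] (split is never empty, so
-- headD's default is never used); append gap + seg for each later segment; "".join(parts)
def spacedLine_alt (widthString : String) (x : Int) (y : Int) : String :=
  let segs := PySem.Chars.splitOn widthString.toList [' ']
  let parts := (PySem.List.enumerate (segs.drop 1) 1).foldl
    (fun (acc : List (List Char)) p =>
      acc ++ [(PySem.List.pyRepeat [' '] x ++ (if p.1 ≤ y then [' ', ' '] else [' '])) ++ p.2])
    [segs.headD []]
  String.mk (PySem.Chars.join [] parts)

-- ===== PRECONDITION & SPEC =====
def Spec_spacedLine (widthString : String) (x : Int) (y : Int) (out : String) : Prop := out = spacedLine_alt widthString x y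
instance (widthString : String) (x : Int) (y : Int) (out : String) : Decidable (Spec_spacedLine widthString x y out) := by unfold Spec_spacedLine; infer_instance

-- ===== CLAIM (what is proved, stated in full; the proofs are below) =====
def Claim_equal_spacedLine : Prop := ∀ (widthString : String) (x : Int) (y : Int), Dom_spacedLine widthString x y → Spec_spacedLine widthString x y (spacedLine widthString x y)

-- ===== LEMMAS AND PROOFS =====

-- the gap inserted for the i-th space (1-based)
def pvGap (x y i : Int) : List Char :=
  PySem.List.pyRepeat [' '] x ++ (if i ≤ y then [' ', ' '] else [' '])

-- reference recursion: A's per-character loop, cnt = spaces seen so far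
def pvCore (x y : Int) : List Char → Int → List Char
  | [], _ => []
  | c :: cs, cnt =>
    if c = ' ' then pvGap x y (cnt + 1) ++ pvCore x y cs (cnt + 1)
    else c :: pvCore x y cs cnt

-- structural single-char split (Python s.split(" "))
def pvSplit : List Char → List (List Char)
  | [] => [[]]
  | c :: cs =>
    if c = ' ' then [] :: pvSplit cs
    else (c :: (pvSplit cs).headD []) :: (pvSplit cs).tail

-- glue segments back, gap i before the segment at 1-based position i
def pvGlue (x y : Int) : List (List Char) → Int → List Char
  | [], _ => []
  | s :: rest, i => (pvGap x y i ++ s) ++ pvGlue x y rest (i + 1)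

theorem pvSplit_ne_nil (cs : List Char) : pvSplit cs ≠ [] := by
  cases cs with
  | nil => simp [pvSplit]
  | cons c cs => simp only [pvSplit]; split <;> simp

theorem pvSplit_headD_tail (cs : List Char) :
    ((pvSplit cs).headD []) :: (pvSplit cs).tail = pvSplit cs := by
  cases h : pvSplit cs with
  | nil => exact absurd h (pvSplit_ne_nil cs)
  | cons a t => simp

theorem pvSplitOn_go (cs : List Char) :
    ∀ (fuel : Nat) (cur : List Char) (acc : List (List Char)), cs.length ≤ fuel →
      PySem.Chars.splitOn.go [' '] fuel cs cur acc =
        acc.reverse ++ (cur.reverse ++ (pvSplit cs).headD []) :: (pvSplit cs).tail := by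
  induction cs with
  | nil =>
    intro fuel cur acc _
    cases fuel <;> simp [PySem.Chars.splitOn.go, pvSplit]
  | cons c cs ih =>
    intro fuel cur acc hf
    cases fuel with
    | zero => simp at hf
    | succ f =>
      simp only [List.length_cons, Nat.succ_le_succ_iff] at hf
      by_cases hc : c = ' '
      · subst hc
        rw [show PySem.Chars.splitOn.go [' '] (f+1) (' ' :: cs) cur acc
              = PySem.Chars.splitOn.go [' '] f cs [] (cur.reverse :: acc) by
            simp [PySem.Chars.splitOn.go, List.isPrefixOf]]
        rw [ih f [] (cur.reverse :: acc) hf]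
        simp only [pvSplit, List.reverse_cons, List.nil_append,
          List.reverse_nil, List.append_assoc, List.singleton_append]
        rw [pvSplit_headD_tail]
        simp
      · rw [show PySem.Chars.splitOn.go [' '] (f+1) (c :: cs) cur acc
              = PySem.Chars.splitOn.go [' '] f cs (c :: cur) acc by
            simp only [PySem.Chars.splitOn.go, List.isPrefixOf, Bool.and_eq_true,
              beq_iff_eq]
            rw [if_neg (by simp [Ne.symm hc])]]
        rw [ih f (c :: cur) acc hf]
        cases h : pvSplit cs with
        | nil => exact absurd h (pvSplit_ne_nil cs)
        | cons a t => simp [pvSplit, hc, h]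

theorem pvSplitOn_eq (cs : List Char) : PySem.Chars.splitOn cs [' '] = pvSplit cs := by
  rw [PySem.Chars.splitOn, pvSplitOn_go cs (cs.length + 1) [] [] (Nat.le_succ _)]
  simpa using pvSplit_headD_tail cs

-- A's fold over the characters accumulates pvCore
theorem pvFoldA (x y : Int) (cs : List Char) :
    ∀ (cnt : Int) (acc : List Char),
      (cs.foldl (fun (st : Int × List Char) ch =>
        if ch = ' ' then
          (st.1 + 1,
            if st.1 + 1 ≤ y then st.2 ++ (PySem.List.pyRepeat [' '] x ++ [' ', ' '])
            else st.2 ++ (PySem.List.pyRepeat [' '] x ++ [' ']))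
        else (st.1, st.2 ++ [ch])) (cnt, acc)).2 = acc ++ pvCore x y cs cnt := by
  induction cs with
  | nil => intro cnt acc; simp [pvCore]
  | cons c cs ih =>
    intro cnt acc
    rw [List.foldl_cons]
    by_cases hc : c = ' '
    · subst hc
      rw [if_pos rfl]
      by_cases hy : cnt + 1 ≤ y
      · rw [if_pos hy, ih]
        have h2 : cnt < y := by omega
        simp [pvCore, pvGap, hy, List.append_assoc]
      · rw [if_neg hy, ih]
        have h2 : ¬ cnt < y := by omega
        simp [pvCore, pvGap, hy, h2, List.append_assoc]
    · rw [if_neg hc, ih]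
      simp [pvCore, hc]

-- pvCore through the split: segments glued with gaps numbered from cnt+1
theorem pvCore_eq_glue (x y : Int) (cs : List Char) :
    ∀ (cnt : Int),
      pvCore x y cs cnt = (pvSplit cs).headD [] ++ pvGlue x y (pvSplit cs).tail (cnt + 1) := by
  induction cs with
  | nil => intro cnt; simp [pvCore, pvSplit, pvGlue]
  | cons c cs ih =>
    intro cnt
    by_cases hc : c = ' '
    · subst hc
      have h1 := ih (cnt + 1)
      cases h : pvSplit cs with
      | nil => exact absurd h (pvSplit_ne_nil cs)
      | cons a t =>
        rw [h] at h1
        simp only [List.headD_cons, List.tail_cons] at h1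
        simp [pvCore, pvSplit, h, h1, pvGlue, List.append_assoc]
    · have h1 := ih cnt
      cases h : pvSplit cs with
      | nil => exact absurd h (pvSplit_ne_nil cs)
      | cons a t =>
        rw [h] at h1
        simp only [List.headD_cons, List.tail_cons] at h1
        simp [pvCore, pvSplit, hc, h, h1]

-- "".join on [] separator is flatten
theorem pvJoinNil (l : List (List Char)) : PySem.Chars.join [] l = l.flatten := by
  induction l with
  | nil => simp [PySem.Chars.join_nil]
  | cons a t ih =>
    cases t with
    | nil => simp [PySem.Chars.join_singleton]
    | cons b r => rw [PySem.Chars.join_cons_cons]; simp [ih]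

-- B's fold appends one part per later segment; flattened it is pvGlue
theorem pvFoldB (x y : Int) (t : List (List Char)) :
    ∀ (i : Int) (acc : List (List Char)),
      ((PySem.List.enumerate t i).foldl
        (fun (acc : List (List Char)) p =>
          acc ++ [(PySem.List.pyRepeat [' '] x ++ (if p.1 ≤ y then [' ', ' '] else [' '])) ++ p.2])
        acc).flatten = acc.flatten ++ pvGlue x y t i := by
  induction t with
  | nil => intro i acc; simp [PySem.List.enumerate, pvGlue]
  | cons s rest ih =>
    intro i acc
    rw [PySem.List.enumerate_cons, List.foldl_cons, ih (i + 1)]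
    simp [pvGlue, pvGap, List.append_assoc]

-- ===== VERDICT (by name: the statement is the Claim_ definition above) =====
theorem spacedLine_spec : Claim_equal_spacedLine := by
  intro w x y _
  unfold Spec_spacedLine spacedLine spacedLine_alt
  simp only []
  rw [show PySem.Chars.len w.toList = PySem.List.len w.toList from rfl]
  rw [PySem.List.foldl_pyRange_pyGetD w.toList ' '
        (fun (st : Int × List Char) ch =>
          if ch = ' ' then
            (st.1 + 1,
              if st.1 + 1 ≤ y then st.2 ++ (PySem.List.pyRepeat [' '] x ++ [' ', ' '])
              else st.2 ++ (PySem.List.pyRepeat [' '] x ++ [' ']))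
          else (st.1, st.2 ++ [ch])) (0, []) (le_refl 0)]
  simp only [Int.toNat_zero, List.drop_zero]
  rw [pvFoldA, pvCore_eq_glue, pvSplitOn_eq, pvJoinNil, pvFoldB]
  cases h : pvSplit w.toList with
  | nil => exact absurd h (pvSplit_ne_nil w.toList)
  | cons a t => simp
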